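-- pv_equiv track=rewrite | github.com/zhangsiyao618/Trim_Read | trim_read.py | base_by_base5
-- ===== SOURCE A (Python) =====
-- def base_by_base5(reads, phred_scores, records, threshold):
--     trimmed_read = []
--     trimmed_phred_score = []
--     trimmed_records = []
--     for read, phred_score, record in zip(reads, phred_scores, records):
--         # If the sequence is already empty, return empty string
--         if len(read) == 0:
--             trimmed_read.append('')
--             trimmed_phred_score.append([])
--             trimmed_records.append('')
--             continue
--
--         # Calculate differences between quality scores and threshold
--         diffs = [q - threshold for q in phred_score]
--
--         # Calculate cumulative sum of differences
--         cumsum = [sum(diffs[:i+1]) for i in range(len(diffs))]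
--
--         # Find minimum cumulative sum index
--         idx = cumsum.index(min(cumsum))
--
--         # Trim sequence and quality lists
--         trimmed_read.append(read[idx+1:])
--         trimmed_phred_score.append(phred_score[idx+1:])
--         trimmed_records.append(record[idx+1:])
--     return trimmed_read, trimmed_phred_score, trimmed_records
-- ===== SOURCE B (Python) =====
-- def base_by_base5(reads, phred_scores, records, threshold):
--     def trim3(read, phred, rec):
--         if not read:
--             return '', [], ''
--         # single pass: running prefix sum of (q - threshold), tracking the
--         # first index where it is minimal
--         run = 0
--         best = None
--         idx = 0
--         for i, q in enumerate(phred):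
--             run += q - threshold
--             if best is None or run < best:
--                 best = run
--                 idx = i
--         cut = idx + 1
--         return read[cut:], phred[cut:], rec[cut:]
--     triples = [trim3(r, p, c) for r, p, c in zip(reads, phred_scores, records)]
--     return [t[0] for t in triples], [t[1] for t in triples], [t[2] for t in triples]
-- ===== Notes on version B (the rewrite author's own statement) =====
-- stated objective: faster
-- what changed: Per read, replaces the quadratic re-summation of every prefix slice followed by min()/list.index() scans with one single pass that maintains a running prefix sum and the first index at which it is minimal; the three result lists are built by projecting a list of trimmed triples instead of three appends.
import Mathlib
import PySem

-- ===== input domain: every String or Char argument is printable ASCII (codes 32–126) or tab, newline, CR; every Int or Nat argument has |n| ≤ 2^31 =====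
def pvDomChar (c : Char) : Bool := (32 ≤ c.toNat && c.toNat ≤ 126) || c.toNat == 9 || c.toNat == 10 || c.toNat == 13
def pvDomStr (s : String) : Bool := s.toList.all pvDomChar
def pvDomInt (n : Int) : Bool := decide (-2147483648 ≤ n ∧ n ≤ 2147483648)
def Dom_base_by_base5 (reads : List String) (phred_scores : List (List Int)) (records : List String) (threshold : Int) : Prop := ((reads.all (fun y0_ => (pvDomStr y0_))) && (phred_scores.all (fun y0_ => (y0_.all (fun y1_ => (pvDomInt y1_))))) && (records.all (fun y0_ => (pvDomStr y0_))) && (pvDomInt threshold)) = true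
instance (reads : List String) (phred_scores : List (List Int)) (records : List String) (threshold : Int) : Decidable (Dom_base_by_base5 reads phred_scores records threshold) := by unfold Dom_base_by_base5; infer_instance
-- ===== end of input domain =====

-- B replaces A's quadratic per-read prefix-slice re-summation + min()/index() scans by one
-- linear pass keeping a running prefix sum and the first index of its minimum (objective: faster).


-- ===== PORT A =====
-- body of A's loop for one zipped (read, phred_score, record) triple
def pvAStep (threshold : Int) (read : String) (phred : List Int) (rec : String) : String × List Int × String :=
  if PySem.Str.len read = 0 then ("", ([] : List Int), "")
  else
    let diffs := phred.map (fun q => q - threshold)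
    let cumsum := (PySem.List.pyRange 0 (diffs.length : Int) 1).map
      (fun i => (PySem.List.slice diffs none (some (i + 1))).sum)
    -- min(cumsum) raises ValueError on an empty list: that case is outside Pre_ (the 0 is never used there)
    let idx : Nat :=
      match PySem.List.min? cumsum (fun y => y) with
      | none => 0
      | some m => (PySem.List.index? cumsum m).getD 0
    (PySem.Str.slice read (some ((idx : Int) + 1)) none,
     PySem.List.slice phred (some ((idx : Int) + 1)) none,
     PySem.Str.slice rec (some ((idx : Int) + 1)) none)

-- A's for-loop over zip(reads, phred_scores, records), appending to three accumulators
def pvALoop (threshold : Int) : List String → List (List Int) → List String → List String × List (List Int) × List String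
  | r :: rs, p :: ps, c :: cs =>
    let x := pvAStep threshold r p c
    let rest := pvALoop threshold rs ps cs
    (x.1 :: rest.1, x.2.1 :: rest.2.1, x.2.2 :: rest.2.2)
  | _, _, _ => ([], [], [])

def base_by_base5 (reads : List String) (phred_scores : List (List Int)) (records : List String) (threshold : Int) : List String × List (List Int) × List String :=
  pvALoop threshold reads phred_scores records

-- ===== PORT B =====
-- Source B's inner for-loop: i, running sum, best-so-far (None before the first element), its first index
def pvBLoop (threshold : Int) : List Int → Nat → Int → Option Int → Nat → Nat
  | [], _, _, _, idx => idx
  | q :: qs, i, run, best, idx =>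
    let run' := run + (q - threshold)
    match best with
    | none => pvBLoop threshold qs (i + 1) run' (some run') i
    | some b =>
      if run' < b then pvBLoop threshold qs (i + 1) run' (some run') i
      else pvBLoop threshold qs (i + 1) run' (some b) idx

-- Source B's trim3
def pvBTrim3 (threshold : Int) (read : String) (phred : List Int) (rec : String) : String × List Int × String :=
  if read = "" then ("", ([] : List Int), "")
  else
    let cut : Int := ((pvBLoop threshold phred 0 0 none 0 : Nat) : Int) + 1
    (PySem.Str.slice read (some cut) none,
     PySem.List.slice phred (some cut) none,
     PySem.Str.slice rec (some cut) none)

def base_by_base5_alt (reads : List String) (phred_scores : List (List Int)) (records : List String) (threshold : Int) : List String × List (List Int) × List String :=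
  let triples := ((reads.zip phred_scores).zip records).map (fun x => pvBTrim3 threshold x.1.1 x.1.2 x.2)
  (triples.map (fun t => t.1), triples.map (fun t => t.2.1), triples.map (fun t => t.2.2))

-- ===== PRECONDITION & SPEC =====
-- Pre_ excludes exactly the inputs on which A raises: a zipped triple whose read is nonempty
-- while its phred-score list is empty makes A call min([]) (ValueError).
def Pre_base_by_base5 (reads : List String) (phred_scores : List (List Int)) (records : List String) (threshold : Int) : Prop :=
  ∀ x ∈ (reads.zip phred_scores).zip records, x.1.1 = "" ∨ x.1.2 ≠ []
instance (reads : List String) (phred_scores : List (List Int)) (records : List String) (threshold : Int) : Decidable (Pre_base_by_base5 reads phred_scores records threshold) := by unfold Pre_base_by_base5; infer_instance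
def pvWitness_base_by_base5 : List String × List (List Int) × List String × Int := (["ACGT", ""], [[30, 10, 40, 20], []], ["r1", "r2"], 20)

def Spec_base_by_base5 (reads : List String) (phred_scores : List (List Int)) (records : List String) (threshold : Int) (out : List String × List (List Int) × List String) : Prop := out = base_by_base5_alt reads phred_scores records threshold
instance (reads : List String) (phred_scores : List (List Int)) (records : List String) (threshold : Int) (out : List String × List (List Int) × List String) : Decidable (Spec_base_by_base5 reads phred_scores records threshold out) := by unfold Spec_base_by_base5; infer_instance

-- ===== CLAIM (what is proved, stated in full; the proofs are below) =====
def Claim_equal_base_by_base5 : Prop := ∀ (reads : List String) (phred_scores : List (List Int)) (records : List String) (threshold : Int), Dom_base_by_base5 reads phred_scores records threshold → Pre_base_by_base5 reads phred_scores records threshold → Spec_base_by_base5 reads phred_scores records threshold (base_by_base5 reads phred_scores records threshold)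
-- ===== LEMMAS AND PROOFS =====

-- prefix sums of ds shifted by r: psumsD r [d1,d2,…] = [r+d1, r+d1+d2, …]
def psumsD (r : Int) : List Int → List Int
  | [] => []
  | d :: ds => (r + d) :: psumsD (r + d) ds

-- first-argmin recursion over an explicit value list (b = best so far, j its index, i next index)
def idxSpec : Int → Nat → Nat → List Int → Nat
  | _, j, _, [] => j
  | b, j, i, y :: ys => if y < b then idxSpec y i (i + 1) ys else idxSpec b j (i + 1) ys

theorem foldl_min_le (l : List Int) (b : Int) : l.foldl min b ≤ b := by
  induction l generalizing b with
  | nil => simp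
  | cons y ys ih => exact le_trans (ih (min b y)) (min_le_left _ _)

theorem foldl_min_eq_or_mem (l : List Int) (b : Int) : l.foldl min b = b ∨ l.foldl min b ∈ l := by
  induction l generalizing b with
  | nil => simp
  | cons y ys ih =>
    rcases ih (min b y) with h | h
    · rcases min_choice b y with hm | hm
      · exact Or.inl (by rw [List.foldl_cons, h, hm])
      · exact Or.inr (by rw [List.foldl_cons, h, hm]; exact List.mem_cons_self)
    · exact Or.inr (List.mem_cons_of_mem y (by rw [List.foldl_cons]; exact h))

-- PySem index? produces Mathlib's idxOf on a member
theorem index?_eq_some_idxOf (cs : List Int) (M : Int) (h : M ∈ cs) :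
    PySem.List.index? cs M = some (List.idxOf M cs) := by
  induction cs with
  | nil => cases h
  | cons y ys ih =>
    by_cases hy : y = M
    · subst hy
      rw [PySem.List.index?_cons_self, List.idxOf_cons_eq _ rfl]
    · have hM : M ∈ ys := by cases h with | head => exact absurd rfl hy | tail _ h => exact h
      rw [PySem.List.index?_cons_of_ne ys hy, ih hM, List.idxOf_cons_ne _ hy]
      rfl

-- the first-argmin recursion equals "index of the first minimum"
theorem idxSpec_eq (cs : List Int) (b : Int) (j i : Nat) :
    idxSpec b j i cs = if cs.foldl min b = b then j else i + List.idxOf (cs.foldl min b) cs := by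
  induction cs generalizing b j i with
  | nil => simp [idxSpec]
  | cons y ys ih =>
    have hfold : (y :: ys).foldl min b = ys.foldl min (min b y) := by simp [List.foldl_cons]
    by_cases hyb : y < b
    · have hminby : min b y = y := min_eq_right (le_of_lt hyb)
      have hMle : ys.foldl min y ≤ y := foldl_min_le ys y
      have hne : ¬ ys.foldl min (min b y) = b := by
        rw [hminby]; intro h; omega
      rw [idxSpec, if_pos hyb, ih, hfold, if_neg hne, hminby]
      by_cases hMy : ys.foldl min y = y
      · rw [if_pos hMy, List.idxOf_cons_eq _ hMy.symm]
        omega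
      · rw [if_neg hMy, List.idxOf_cons_ne _ (fun h => hMy h.symm)]
        omega
    · have hminby : min b y = b := min_eq_left (le_of_not_gt hyb)
      rw [idxSpec, if_neg hyb, ih, hfold, hminby]
      by_cases hMb : ys.foldl min b = b
      · rw [if_pos hMb, if_pos hMb]
      · have hMle : ys.foldl min b ≤ b := foldl_min_le ys b
        have hyM : y ≠ ys.foldl min b := by
          intro h; omega
        rw [if_neg hMb, if_neg hMb, List.idxOf_cons_ne _ hyM]
        omega

-- B's single pass (once best is some) is idxSpec over the shifted prefix sums
theorem pvBLoop_eq_idxSpec (t : Int) (qs : List Int) (i : Nat) (r b : Int) (j : Nat) :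
    pvBLoop t qs i r (some b) j = idxSpec b j i (psumsD r (qs.map (fun q => q - t))) := by
  induction qs generalizing i r b j with
  | nil => simp [pvBLoop, psumsD, idxSpec]
  | cons q qs ih =>
    show (if r + (q - t) < b then pvBLoop t qs (i+1) (r + (q - t)) (some (r + (q - t))) i
          else pvBLoop t qs (i+1) (r + (q - t)) (some b) j) = _
    simp only [List.map_cons, psumsD, idxSpec]
    by_cases h : r + (q - t) < b
    · rw [if_pos h, if_pos h, ih]
    · rw [if_neg h, if_neg h, ih]

-- A's comprehension [sum(diffs[:i+1]) for i in range(len(diffs))] in pure form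
theorem cumsum_eq_map_range (ds : List Int) :
    (PySem.List.pyRange 0 (ds.length : Int) 1).map (fun i => (PySem.List.slice ds none (some (i + 1))).sum)
      = (List.range ds.length).map (fun k => (ds.take (k + 1)).sum) := by
  rw [PySem.List.pyRange_one]
  simp only [Int.sub_zero, Int.toNat_natCast, List.map_map]
  apply List.map_congr_left
  intro k _
  simp only [Function.comp_apply, zero_add]
  rw [PySem.List.slice_to ds (show (0:Int) ≤ (k:Int) + 1 by omega)]
  congr 2

theorem map_range_take_sum (ds : List Int) (r : Int) :
    (List.range ds.length).map (fun k => r + (ds.take (k + 1)).sum) = psumsD r ds := by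
  induction ds generalizing r with
  | nil => simp [psumsD]
  | cons d ds ih =>
    rw [List.length_cons, List.range_succ_eq_map, List.map_cons, List.map_map]
    simp only [List.take_succ_cons, List.sum_cons, psumsD]
    congr 1
    · simp
    · rw [← ih (r + d)]
      apply List.map_congr_left
      intro k _
      simp only [Function.comp_apply]
      ring

theorem cumsum_eq_psumsD (ds : List Int) :
    (PySem.List.pyRange 0 (ds.length : Int) 1).map (fun i => (PySem.List.slice ds none (some (i + 1))).sum)
      = psumsD 0 ds := by
  rw [cumsum_eq_map_range, ← map_range_take_sum ds 0]
  apply List.map_congr_left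
  intro k _
  ring

-- A's "cumsum.index(min(cumsum))" on a nonempty list x :: cs is the first-argmin recursion
theorem pvHeadIdx (x : Int) (cs : List Int) :
    (match PySem.List.min? (x :: cs) (fun y => y) with
      | none => 0
      | some m => (PySem.List.index? (x :: cs) m).getD 0) = idxSpec x 0 1 cs := by
  simp only [PySem.List.min?_id_cons]
  rw [idxSpec_eq]
  by_cases hMx : cs.foldl min x = x
  · rw [if_pos hMx, hMx, PySem.List.index?_cons_self]
    rfl
  · have hmem : cs.foldl min x ∈ cs := (foldl_min_eq_or_mem cs x).resolve_left hMx
    rw [if_neg hMx, PySem.List.index?_cons_of_ne cs (fun hh => hMx hh.symm),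
      index?_eq_some_idxOf cs _ hmem]
    simp only [Option.map_some, Option.getD_some]
    exact Nat.add_comm _ 1

-- one zipped triple: A's step equals B's trim3 whenever A does not raise there
theorem step_eq (t : Int) (r : String) (p : List Int) (c : String) (h : r = "" ∨ p ≠ []) :
    pvAStep t r p c = pvBTrim3 t r p c := by
  have hlen : (PySem.Str.len r = 0) ↔ r = "" := by
    simp only [PySem.Str.len_eq]
    constructor
    · intro hh; cases r; simp_all [String.toList]
    · intro hh; simp [hh]
  by_cases hr : r = ""
  · rw [pvAStep, if_pos (hlen.mpr hr), pvBTrim3, if_pos hr]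
  · have hp : p ≠ [] := h.resolve_left hr
    rw [pvAStep, if_neg (fun hh => hr (hlen.mp hh)), pvBTrim3, if_neg hr]
    -- both sides slice at (idx+1); show the two idx computations agree
    have hidx :
        (match PySem.List.min? ((PySem.List.pyRange 0 ((p.map (fun q => q - t)).length : Int) 1).map
            (fun i => (PySem.List.slice (p.map (fun q => q - t)) none (some (i + 1))).sum)) (fun y => y) with
          | none => 0
          | some m => (PySem.List.index? ((PySem.List.pyRange 0 ((p.map (fun q => q - t)).length : Int) 1).map
              (fun i => (PySem.List.slice (p.map (fun q => q - t)) none (some (i + 1))).sum)) m).getD 0)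
          = pvBLoop t p 0 0 none 0 := by
      rw [cumsum_eq_psumsD (p.map (fun q => q - t))]
      obtain ⟨q, qs, rfl⟩ := List.exists_cons_of_ne_nil hp
      have hps : psumsD 0 ((q :: qs).map (fun q => q - t))
          = (0 + (q - t)) :: psumsD (0 + (q - t)) (qs.map (fun q => q - t)) := rfl
      rw [hps]
      have hB : pvBLoop t (q :: qs) 0 0 none 0
          = idxSpec (0 + (q - t)) 0 1 (psumsD (0 + (q - t)) (qs.map (fun q => q - t))) := by
        show pvBLoop t qs 1 (0 + (q - t)) (some (0 + (q - t))) 0 = _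
        exact pvBLoop_eq_idxSpec t qs 1 (0 + (q - t)) (0 + (q - t)) 0
      exact (pvHeadIdx (0 + (q - t)) (psumsD (0 + (q - t)) (qs.map (fun q => q - t)))).trans hB.symm
    simp only [hidx]
-- the two whole-list traversals agree element-wise under Pre_
theorem loop_eq (t : Int) (rs : List String) (ps : List (List Int)) (cs : List String)
    (h : ∀ x ∈ (rs.zip ps).zip cs, x.1.1 = "" ∨ x.1.2 ≠ []) :
    pvALoop t rs ps cs =
      (let triples := ((rs.zip ps).zip cs).map (fun x => pvBTrim3 t x.1.1 x.1.2 x.2)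
       (triples.map (fun tr => tr.1), triples.map (fun tr => tr.2.1), triples.map (fun tr => tr.2.2))) := by
  induction rs generalizing ps cs with
  | nil => simp [pvALoop]
  | cons r rs ih =>
    cases ps with
    | nil => simp [pvALoop]
    | cons p ps =>
      cases cs with
      | nil => simp [pvALoop]
      | cons c cs =>
        have hhead : r = "" ∨ p ≠ [] := h ((r, p), c) (by simp)
        have htail := ih ps cs (fun x hx => h x (by simp [hx]))
        simp only [List.zip_cons_cons, List.map_cons, pvALoop]
        rw [htail, step_eq t r p c hhead]

-- ===== VERDICT (by name: the statement is the Claim_ definition above) =====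
theorem base_by_base5_spec : Claim_equal_base_by_base5 := by
  intro reads phred_scores records threshold _ hpre
  show base_by_base5 reads phred_scores records threshold = base_by_base5_alt reads phred_scores records threshold
  exact loop_eq threshold reads phred_scores records hpre
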